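-- pv_equiv track=rewrite | github.com/bssrdf/pyleet | F/FindtheMaximumNumberofMarkedIndices.py | maxNumOfMarkedIndices2
-- ===== SOURCE A (Python) =====
-- from typing import List
--
-- def maxNumOfMarkedIndices2(nums: List[int]) -> int:
--     A = nums
--     n = len(A)
--     A.sort()
--     l, r = 0, n // 2
--     ans = 0
--     while l < n // 2 and r < n:
--         if 2*A[l] <= A[r]:
--             l += 1
--             r += 1
--             ans += 2
--         else:
--             r += 1
--     return ans
-- ===== SOURCE B (Python) =====
-- from typing import List
--
-- def maxNumOfMarkedIndices2(nums: List[int]) -> int: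
--     # Binary search over the number of pairs k: pairing the k smallest with
--     # the k largest (i <-> n-k+i) is feasible iff k pairs can be marked.
--     # (sorts nums in place, like the original)
--     nums.sort()
--     n = len(nums)
--
--     def feasible(k):
--         return all(2 * nums[i] <= nums[n - k + i] for i in range(k))
--
--     lo, hi = 0, n // 2
--     while lo < hi:
--         mid = (lo + hi + 1) // 2
--         if feasible(mid):
--             lo = mid
--         else:
--             hi = mid - 1
--     return 2 * lo
-- ===== Notes on version B (the rewrite author's own statement) =====
-- stated objective: alternative
-- what changed: replaces the linear two-pointer greedy sweep with a binary search over the number of pairs k, testing feasibility of the canonical pairing i <-> n-k+i on the sorted array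
import Mathlib
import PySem

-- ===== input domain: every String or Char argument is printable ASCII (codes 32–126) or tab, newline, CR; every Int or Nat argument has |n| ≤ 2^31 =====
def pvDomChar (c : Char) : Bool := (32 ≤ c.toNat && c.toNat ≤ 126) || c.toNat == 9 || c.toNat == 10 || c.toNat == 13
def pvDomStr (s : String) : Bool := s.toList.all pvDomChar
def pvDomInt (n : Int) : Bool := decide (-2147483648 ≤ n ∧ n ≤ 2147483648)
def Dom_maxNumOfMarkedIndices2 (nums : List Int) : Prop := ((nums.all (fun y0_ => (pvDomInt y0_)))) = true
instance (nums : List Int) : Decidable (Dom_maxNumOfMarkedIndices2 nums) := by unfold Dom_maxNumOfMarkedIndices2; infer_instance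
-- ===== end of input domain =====

-- B replaces A's linear two-pointer greedy sweep by a binary search over the number of
-- pairs k, testing feasibility of the canonical pairing i <-> n-k+i on the sorted array
-- (objective: alternative algorithm of the same cost; both Pythons sort nums in place —
-- the theorems below are about the return value, the mutation is identical).

-- ===== PORT A =====
-- A's while loop; all indices are in range when called as below, so pyGetD's default 0 is never read.
def loopA_maxNum (A : List Int) (n l r ans : Int) : Int :=
  if _h : l < PySem.Int.floordiv n 2 ∧ r < n then
    if 2 * PySem.List.pyGetD A l 0 ≤ PySem.List.pyGetD A r 0 then
      loopA_maxNum A n (l + 1) (r + 1) (ans + 2)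
    else
      loopA_maxNum A n l (r + 1) ans
  else ans
termination_by (n - r).toNat
decreasing_by all_goals omega

def maxNumOfMarkedIndices2 (nums : List Int) : Int :=
  let A := PySem.List.sorted nums (fun x => x) false
  let n : Int := A.length
  loopA_maxNum A n 0 (PySem.Int.floordiv n 2) 0

-- ===== PORT B =====
-- B's feasible(k): all(2*nums[i] <= nums[n-k+i] for i in range(k)); indices in range when used.
def feasB_maxNum (A : List Int) (n k : Int) : Bool :=
  (PySem.List.pyRange 0 k 1).all
    (fun i => 2 * PySem.List.pyGetD A i 0 ≤ PySem.List.pyGetD A (n - k + i) 0)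

-- B's binary-search loop over lo/hi.
def loopB_maxNum (A : List Int) (n lo hi : Int) : Int :=
  if _h : lo < hi then
    let mid := PySem.Int.floordiv (lo + hi + 1) 2
    if feasB_maxNum A n mid then loopB_maxNum A n mid hi
    else loopB_maxNum A n lo (mid - 1)
  else lo
termination_by (hi - lo).toNat
decreasing_by
  all_goals
    have hm := PySem.Int.floordiv_eq_ediv_of_pos (a := lo + hi + 1) (b := 2) (by omega)
    simp only [mid] at *; omega

def maxNumOfMarkedIndices2_alt (nums : List Int) : Int :=
  let A := PySem.List.sorted nums (fun x => x) false
  let n : Int := A.length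
  2 * loopB_maxNum A n 0 (PySem.Int.floordiv n 2)

-- ===== PRECONDITION & SPEC =====
def Spec_maxNumOfMarkedIndices2 (nums : List Int) (out : Int) : Prop := out = maxNumOfMarkedIndices2_alt nums
instance (nums : List Int) (out : Int) : Decidable (Spec_maxNumOfMarkedIndices2 nums out) := by unfold Spec_maxNumOfMarkedIndices2; infer_instance

-- ===== CLAIM (what is proved, stated in full; the proofs are below) =====
def Claim_equal_maxNumOfMarkedIndices2 : Prop := ∀ (nums : List Int), Dom_maxNumOfMarkedIndices2 nums → Spec_maxNumOfMarkedIndices2 nums (maxNumOfMarkedIndices2 nums)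

-- ===== LEMMAS AND PROOFS =====

-- "k pairs are feasible": the k smallest paired with the k largest all satisfy 2*x ≤ y.
def FeasI (A : List Int) (n k : Int) : Prop :=
  ∀ i : Int, 0 ≤ i → i < k → 2 * PySem.List.pyGetD A i 0 ≤ PySem.List.pyGetD A (n - k + i) 0

-- monotone access to a sorted list
theorem pv_mono_sorted (nums : List Int) :
    ∀ i j : Int, 0 ≤ i → i ≤ j → j < (PySem.List.sorted nums (fun x => x) false).length →
      PySem.List.pyGetD (PySem.List.sorted nums (fun x => x) false) i 0 ≤
      PySem.List.pyGetD (PySem.List.sorted nums (fun x => x) false) j 0 := by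
  intro i j hi hij hj
  set A := PySem.List.sorted nums (fun x => x) false with hA
  have hp : A.Pairwise (· ≤ ·) := by
    simpa using PySem.List.sorted_pairwise nums (fun x => x)
  rw [PySem.List.pyGetD_eq_getElem A (i := i) 0 hi (by omega),
      PySem.List.pyGetD_eq_getElem A (i := j) 0 (by omega) (by omega)]
  rcases eq_or_lt_of_le hij with h | h
  · simp [h]
  · exact (List.pairwise_iff_getElem.mp hp) i.toNat j.toNat (by omega) (by omega) (by omega)

-- feasibility is downward closed
theorem pv_feas_mono (A : List Int) (n k k' : Int)
    (mono : ∀ i j : Int, 0 ≤ i → i ≤ j → j < n →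
      PySem.List.pyGetD A i 0 ≤ PySem.List.pyGetD A j 0)
    (_hk : 0 ≤ k) (hkk : k ≤ k') (hk' : 2 * k' ≤ n) (hf : FeasI A n k') : FeasI A n k := by
  intro i hi hik
  have h1 := hf i hi (by omega)
  have h2 := mono (n - k' + i) (n - k + i) (by omega) (by omega) (by omega)
  omega

-- feasB computes FeasI
theorem pv_feasB_iff (A : List Int) (n k : Int) :
    feasB_maxNum A n k = true ↔ FeasI A n k := by
  simp [feasB_maxNum, FeasI, List.all_eq_true, PySem.List.mem_pyRange_one]

-- the two-pointer loop returns ans + 2*(L - l) where L is the maximum feasible pair count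
theorem pv_loopA_main (A : List Int) (n : Int) (_hn : (A.length : Int) = n)
    (mono : ∀ i j : Int, 0 ≤ i → i ≤ j → j < n →
      PySem.List.pyGetD A i 0 ≤ PySem.List.pyGetD A j 0) :
    ∀ (m : Nat) (l r ans : Int), (n - r).toNat ≤ m →
      0 ≤ l → l ≤ PySem.Int.floordiv n 2 → l ≤ r → r ≤ n →
      (∀ i : Int, 0 ≤ i → i < l →
        2 * PySem.List.pyGetD A i 0 ≤ PySem.List.pyGetD A (r - l + i) 0) →
      ∃ L, loopA_maxNum A n l r ans = ans + 2 * (L - l) ∧ l ≤ L ∧ L ≤ PySem.Int.floordiv n 2 ∧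
        FeasI A n L ∧
        (∀ k, 0 ≤ k → k ≤ PySem.Int.floordiv n 2 → FeasI A n k → k + r ≤ l + n → k ≤ L) := by
  have hd : PySem.Int.floordiv n 2 = n / 2 := PySem.Int.floordiv_eq_ediv_of_pos (by omega)
  intro m
  induction m with
  | zero =>
    intro l r ans hm hl0 hlh hlr hrn inv
    have hguard : ¬ (l < PySem.Int.floordiv n 2 ∧ r < n) := by omega
    rw [loopA_maxNum, dif_neg hguard]
    refine ⟨l, by ring_nf, le_refl l, hlh, ?_, ?_⟩
    · intro i hi hil
      exact le_trans (inv i hi hil) (mono _ _ (by omega) (by omega) (by omega))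
    · intro k hk0 hkh hkf hkr; omega
  | succ m ih =>
    intro l r ans hm hl0 hlh hlr hrn inv
    by_cases hguard : l < PySem.Int.floordiv n 2 ∧ r < n
    · rw [loopA_maxNum, dif_pos hguard]
      by_cases ht : 2 * PySem.List.pyGetD A l 0 ≤ PySem.List.pyGetD A r 0
      · rw [if_pos ht]
        obtain ⟨L, heq, hLl, hLh, hLf, hLmax⟩ :=
          ih (l + 1) (r + 1) (ans + 2) (by omega) (by omega) (by omega) (by omega) (by omega)
            (by
              intro i hi hil
              rcases lt_or_ge i l with h | h
              · have := inv i hi h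
                have hidx : r + 1 - (l + 1) + i = r - l + i := by ring
                rw [hidx]; exact this
              · have hieq : i = l := by omega
                have hidx : r + 1 - (l + 1) + i = r := by omega
                rw [hidx, hieq]; exact ht)
        exact ⟨L, by rw [heq]; ring, by omega, hLh, hLf,
          fun k hk0 hkh hkf hkr => hLmax k hk0 hkh hkf (by omega)⟩
      · rw [if_neg ht]
        obtain ⟨L, heq, hLl, hLh, hLf, hLmax⟩ :=
          ih l (r + 1) ans (by omega) hl0 hlh (by omega) (by omega)
            (by
              intro i hi hil
              exact le_trans (inv i hi hil) (mono (r - l + i) (r + 1 - l + i)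
                (by omega) (by omega) (by omega)))
        refine ⟨L, heq, hLl, hLh, hLf, ?_⟩
        intro k hk0 hkh hkf hkr
        by_cases h : k ≤ l
        · omega
        · push Not at h
          refine hLmax k hk0 hkh hkf ?_
          by_contra hc
          push Not at hc
          have heqr : n - k + l = r := by omega
          have := hkf l hl0 h
          rw [heqr] at this
          exact ht this
    · rw [loopA_maxNum, dif_neg hguard]
      refine ⟨l, by ring_nf, le_refl l, hlh, ?_, ?_⟩
      · intro i hi hil
        exact le_trans (inv i hi hil) (mono _ _ (by omega) (by omega) (by omega))
      · intro k hk0 hkh hkf hkr; omega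

-- the binary search returns the maximum feasible pair count
theorem pv_loopB_main (A : List Int) (n : Int) (_hn : (A.length : Int) = n)
    (mono : ∀ i j : Int, 0 ≤ i → i ≤ j → j < n →
      PySem.List.pyGetD A i 0 ≤ PySem.List.pyGetD A j 0) :
    ∀ (m : Nat) (lo hi : Int), (hi - lo).toNat ≤ m →
      0 ≤ lo → lo ≤ hi → hi ≤ PySem.Int.floordiv n 2 → FeasI A n lo →
      (∀ k, 0 ≤ k → k ≤ PySem.Int.floordiv n 2 → FeasI A n k → k ≤ hi) →
      ∃ M, loopB_maxNum A n lo hi = M ∧ 0 ≤ M ∧ M ≤ PySem.Int.floordiv n 2 ∧ FeasI A n M ∧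
        (∀ k, 0 ≤ k → k ≤ PySem.Int.floordiv n 2 → FeasI A n k → k ≤ M) := by
  have hd : PySem.Int.floordiv n 2 = n / 2 := PySem.Int.floordiv_eq_ediv_of_pos (by omega)
  intro m
  induction m with
  | zero =>
    intro lo hi hm hlo hlh hhi hfeas hupper
    have hguard : ¬ lo < hi := by omega
    rw [loopB_maxNum, dif_neg hguard]
    exact ⟨lo, rfl, hlo, by omega, hfeas, fun k hk0 hkh hkf => by have := hupper k hk0 hkh hkf; omega⟩
  | succ m ih =>
    intro lo hi hm hlo hlh hhi hfeas hupper
    by_cases hguard : lo < hi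
    · rw [loopB_maxNum]
      simp only [dif_pos hguard]
      have hmid : PySem.Int.floordiv (lo + hi + 1) 2 = (lo + hi + 1) / 2 :=
        PySem.Int.floordiv_eq_ediv_of_pos (by omega)
      by_cases hf : feasB_maxNum A n (PySem.Int.floordiv (lo + hi + 1) 2) = true
      · rw [if_pos hf]
        exact ih (PySem.Int.floordiv (lo + hi + 1) 2) hi (by omega) (by omega) (by omega) (by omega)
          ((pv_feasB_iff A n _).mp hf) hupper
      · rw [if_neg hf]
        refine ih lo (PySem.Int.floordiv (lo + hi + 1) 2 - 1) (by omega) hlo ?_ (by omega) hfeas ?_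
        · -- lo ≤ mid - 1: if lo = mid - 1 trivially; need lo < mid
          omega
        · intro k hk0 hkh hkf
          by_contra hc
          push Not at hc
          exact hf ((pv_feasB_iff A n _).mpr
            (pv_feas_mono A n _ k mono (by omega) (by omega) (by omega) hkf))
    · rw [loopB_maxNum, dif_neg hguard]
      exact ⟨lo, rfl, hlo, by omega, hfeas, fun k hk0 hkh hkf => by have := hupper k hk0 hkh hkf; omega⟩

-- ===== VERDICT (by name: the statement is the Claim_ definition above) =====
theorem maxNumOfMarkedIndices2_spec : Claim_equal_maxNumOfMarkedIndices2 := by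
  intro nums _
  unfold Spec_maxNumOfMarkedIndices2 maxNumOfMarkedIndices2 maxNumOfMarkedIndices2_alt
  set A := PySem.List.sorted nums (fun x => x) false with hA
  set n : Int := (A.length : Int) with hn
  have hdiv := PySem.Int.floordiv_eq_ediv_of_pos (a := n) (b := 2) (by omega)
  have hn0 : 0 ≤ n := by simp [hn]
  have mono := pv_mono_sorted nums
  rw [← hA, ← hn] at mono
  obtain ⟨L, hLeq, hL0, hLh, hLf, hLmax⟩ :=
    pv_loopA_main A n rfl mono (n - PySem.Int.floordiv n 2).toNat 0 (PySem.Int.floordiv n 2) 0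
      (le_refl _) (le_refl _) (by omega) (by omega) (by omega) (by omega)
  obtain ⟨M, hMeq, hM0, hMh, hMf, hMmax⟩ :=
    pv_loopB_main A n rfl mono (PySem.Int.floordiv n 2 - 0).toNat 0 (PySem.Int.floordiv n 2)
      (le_refl _) (le_refl _) (by omega) (by omega)
      (by intro i hi hik; omega) (by intro k hk hkh hkf; omega)
  have h1 : M ≤ L := hLmax M hM0 hMh hMf (by omega)
  have h2 : L ≤ M := hMmax L (by omega) hLh hLf
  rw [hLeq]
  show _ = 2 * loopB_maxNum A n 0 (PySem.Int.floordiv n 2)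
  rw [hMeq]; omega
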